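-- pv_equiv track=rewrite | github.com/younlea/2026_architect_9B_team | src/backend/agent/conversation_gen.py | _parse_dialog
-- ===== SOURCE A (Python) =====
-- def _parse_dialog(raw: str, speakers: list[str]) -> list[dict]:
--     messages = []
--     for line in raw.strip().split("\n"):
--         line = line.strip()
--         if not line:
--             continue
--         for sp in speakers:
--             if line.startswith(f"{sp}:"):
--                 content = line[len(sp) + 1:].strip()
--                 if content:
--                     messages.append({"speaker": sp, "content": content})
--                 break
--         else:
--             # 화자 구분이 불명확한 경우 마지막 화자에 추가
--             if messages and line:
--                 messages[-1]["content"] += " " + line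
--     return messages
-- ===== SOURCE B (Python) =====
-- def _parse_dialog(raw: str, speakers: list[str]) -> list[dict]:
--     # tag every non-empty stripped line with (first matching speaker or None, content)
--     def classify(ln):
--         sp = next((s for s in speakers if ln.startswith(s + ":")), None)
--         return (sp, ln if sp is None else ln[len(sp) + 1:].strip())
--
--     tagged = [classify(s) for s in (ln.strip() for ln in raw.strip().split("\n")) if s]
--
--     # segment scan: each "starter" (speaker line with non-empty content) opens a block;
--     # gather the block's continuation lines and emit one message via " ".join
--     messages = []
--     i, n = 0, len(tagged)
--     while i < n:
--         sp, c = tagged[i]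
--         i += 1
--         if sp is None or not c:
--             continue  # leading/blockless junk or empty-content speaker line: no message
--         parts = [c]
--         while i < n and not (tagged[i][0] is not None and tagged[i][1]):
--             if tagged[i][0] is None:
--                 parts.append(tagged[i][1])
--             i += 1
--         messages.append({"speaker": sp, "content": " ".join(parts)})
--     return messages
-- ===== Notes on version B (the rewrite author's own statement) =====
-- stated objective: alternative
-- what changed: B replaces A's single loop that mutates messages[-1] per continuation line with a segment scan: it tags lines once, then consumes the tagged list block by block (a starter speaker line plus its continuation lines) and emits each message in one step via ' '.join, never updating an already-emitted message.
import Mathlib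
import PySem

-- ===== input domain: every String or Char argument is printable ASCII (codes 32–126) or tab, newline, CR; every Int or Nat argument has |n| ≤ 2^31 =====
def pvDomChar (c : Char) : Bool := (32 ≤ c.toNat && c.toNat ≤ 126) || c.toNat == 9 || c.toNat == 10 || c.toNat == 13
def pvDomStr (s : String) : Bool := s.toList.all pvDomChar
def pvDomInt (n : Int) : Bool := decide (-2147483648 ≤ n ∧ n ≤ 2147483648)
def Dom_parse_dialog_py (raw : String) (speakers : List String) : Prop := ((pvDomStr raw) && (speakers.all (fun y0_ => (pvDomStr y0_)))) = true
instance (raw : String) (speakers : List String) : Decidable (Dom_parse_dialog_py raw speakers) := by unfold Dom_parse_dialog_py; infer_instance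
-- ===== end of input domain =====

-- B replaces A's loop that mutates messages[-1] with a block/segment scan (tag lines, then emit one joined message per starter block); return values proved equal on all inputs.


-- messages[-1]["content"] += " " + line : the dicts built here have the two distinct
-- keys "speaker","content", so overwriting the (unique) "content" entry in place is exact.
def pvAddContent (d : List (String × String)) (extra : String) : List (String × String) :=
  d.map (fun kv => if kv.1 == "content" then (kv.1, kv.2 ++ extra) else kv)

-- ===== PORT A =====
-- the inner `for sp in speakers: … break` with its `else:` clause
def pvAInner (line : String) (messages : List (List (String × String))) :
    List String → List (List (String × String))
  | [] =>  -- for-else: no speaker matched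
      if messages ≠ [] ∧ line ≠ "" then
        messages.dropLast ++ [pvAddContent ((messages.getLast?).getD []) (" " ++ line)]
      else messages
  | sp :: rest =>
      if PySem.Str.startswith line (sp ++ ":") then
        let content := PySem.Str.strip (PySem.Str.slice line (some (PySem.Str.len sp + 1)) none)
        if content ≠ "" then messages ++ [[("speaker", sp), ("content", content)]] else messages
      else pvAInner line messages rest

def parse_dialog_py (raw : String) (speakers : List String) : List (List (String × String)) :=
  -- split? never returns none here since the separator "\n" is non-empty
  ((PySem.Str.split? (PySem.Str.strip raw) "\n").getD []).foldl
    (fun messages ln =>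
      let line := PySem.Str.strip ln
      if line = "" then messages
      else pvAInner line messages speakers)
    []

-- ===== PORT B =====
-- Source B's classify: first speaker whose "sp:" prefix matches (next(...)), and the content
def pvClassify (speakers : List String) (ln : String) : Option String × String :=
  match speakers.find? (fun s => PySem.Str.startswith ln (s ++ ":")) with
  | none => (none, ln)
  | some sp => (some sp, PySem.Str.strip (PySem.Str.slice ln (some (PySem.Str.len sp + 1)) none))

-- the condition of Source B's inner while: tagged[i] would start a new block
def pvIsStarter (t : Option String × String) : Bool := t.1.isSome && !(t.2 == "")

-- Source B's outer while over the tagged list (inner while = takeWhile/dropWhile on the rest)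
def pvBuild : List (Option String × String) → List (List (String × String))
  | [] => []
  | (sp, c) :: rest =>
      match sp with
      | none => pvBuild rest
      | some s =>
          if c = "" then pvBuild rest
          else
            let parts := c :: (rest.takeWhile (fun t => !pvIsStarter t)).filterMap
                (fun t => if t.1.isNone then some t.2 else none)
            [("speaker", s), ("content", PySem.Str.join " " parts)] ::
              pvBuild (rest.dropWhile (fun t => !pvIsStarter t))
termination_by ts => ts.length
decreasing_by
  all_goals simp
  exact List.length_dropWhile_le _ _

def parse_dialog_py_alt (raw : String) (speakers : List String) : List (List (String × String)) :=
  pvBuild ((((PySem.Str.split? (PySem.Str.strip raw) "\n").getD []).filterMap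
    (fun ln => let s := PySem.Str.strip ln; if s = "" then none else some s)).map
    (pvClassify speakers))

-- ===== PRECONDITION & SPEC =====
def Spec_parse_dialog_py (raw : String) (speakers : List String) (out : List (List (String × String))) : Prop := out = parse_dialog_py_alt raw speakers
instance (raw : String) (speakers : List String) (out : List (List (String × String))) : Decidable (Spec_parse_dialog_py raw speakers out) := by unfold Spec_parse_dialog_py; infer_instance

-- ===== CLAIM (what is proved, stated in full; the proofs are below) =====
def Claim_equal_parse_dialog_py : Prop := ∀ (raw : String) (speakers : List String), Dom_parse_dialog_py raw speakers → Spec_parse_dialog_py raw speakers (parse_dialog_py raw speakers)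

-- ===== LEMMAS AND PROOFS =====

-- proof-side view of A's per-line action on the tagged value
def pvAccum (messages : List (List (String × String))) :
    Option String × String → List (List (String × String))
  | (some sp, content) =>
      if content ≠ "" then messages ++ [[("speaker", sp), ("content", content)]] else messages
  | (none, content) =>
      match messages with
      | [] => messages
      | _ :: _ => messages.dropLast ++ [pvAddContent ((messages.getLast?).getD []) (" " ++ content)]

-- one non-empty line: A's inner for/else equals accumulate-on-classification
lemma inner_eq_accum (line : String) (hline : line ≠ "")
    (messages : List (List (String × String))) (speakers : List String) :
    pvAInner line messages speakers = pvAccum messages (pvClassify speakers line) := by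
  induction speakers with
  | nil =>
      simp only [pvAInner, pvClassify, List.find?_nil]
      cases messages with
      | nil => simp [pvAccum]
      | cons m ms => simp [pvAccum, hline]
  | cons sp rest ih =>
      simp only [pvAInner, pvClassify, List.find?_cons]
      by_cases h : PySem.Str.startswith line (sp ++ ":") = true
      · have h' : PySem.Chars.startswith line.toList (sp.toList ++ [':']) = true := by
          simpa using h
        simp [h', pvAccum]
      · have h' : PySem.Chars.startswith line.toList (sp.toList ++ [':']) = false := by
          simpa using h
        simpa [h', pvClassify, pvAccum] using ih

-- A's whole fold equals the fold of pvAccum over the tagged list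
lemma fold_eq_accum (speakers : List String) (ls : List String)
    (acc : List (List (String × String))) :
    ls.foldl (fun messages ln =>
        let line := PySem.Str.strip ln
        if line = "" then messages else pvAInner line messages speakers) acc
      = ((ls.filterMap (fun ln => let s := PySem.Str.strip ln;
            if s = "" then none else some s)).map (pvClassify speakers)).foldl pvAccum acc := by
  induction ls generalizing acc with
  | nil => rfl
  | cons ln rest ih =>
      simp only [List.foldl_cons, List.filterMap_cons]
      by_cases h : PySem.Str.strip ln = ""
      · simp only [h]
        simpa [h] using ih acc
      · simp only [if_neg h]
        rw [inner_eq_accum _ h, ih]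
        simp

-- the string A accumulates over a continuation block, from start c
def pvJoinAcc (c : String) (bl : List (Option String × String)) : String :=
  bl.foldl (fun a t => if t.1.isNone then a ++ " " ++ t.2 else a) c

lemma join_glue (sep p q : List Char) (rest : List (List Char)) :
    PySem.Chars.join sep (p :: q :: rest) = PySem.Chars.join sep ((p ++ sep ++ q) :: rest) := by
  cases rest with
  | nil => simp [PySem.Chars.join, List.intercalate]
  | cons r rs =>
      rw [PySem.Chars.join_cons_cons, PySem.Chars.join_cons_cons, PySem.Chars.join_cons_cons]
      simp [List.append_assoc]

lemma str_join_glue (c x : String) (rest : List String) :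
    PySem.Str.join " " (c :: x :: rest) = PySem.Str.join " " ((c ++ " " ++ x) :: rest) := by
  simp only [PySem.Str.join, List.map_cons, String.toList_append]
  rw [join_glue]

lemma joinAcc_eq_join (bl : List (Option String × String))
    (hbl : ∀ t ∈ bl, pvIsStarter t = false) (c : String) :
    pvJoinAcc c bl
      = PySem.Str.join " " (c :: bl.filterMap (fun t => if t.1.isNone then some t.2 else none)) := by
  induction bl generalizing c with
  | nil => simp [pvJoinAcc, PySem.Str.join, PySem.Chars.join, List.intercalate]
  | cons t rest ih =>
      have hrest : ∀ u ∈ rest, pvIsStarter u = false := fun u hu => hbl u (List.mem_cons_of_mem _ hu)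
      cases t with
      | mk osp txt =>
          cases osp with
          | none =>
              have h1 : pvJoinAcc c ((none, txt) :: rest) = pvJoinAcc (c ++ " " ++ txt) rest := by
                simp [pvJoinAcc]
              have h2 : ((none, txt) :: rest).filterMap
                  (fun t => if t.1.isNone then some t.2 else none)
                  = txt :: rest.filterMap (fun t => if t.1.isNone then some t.2 else none) := by
                simp
              rw [h1, ih hrest, h2, str_join_glue]
          | some sp =>
              have h1 : pvJoinAcc c ((some sp, txt) :: rest) = pvJoinAcc c rest := by
                simp [pvJoinAcc]
              have h2 : ((some sp, txt) :: rest).filterMap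
                  (fun t => if t.1.isNone then some t.2 else none)
                  = rest.filterMap (fun t => if t.1.isNone then some t.2 else none) := by
                simp
              rw [h1, ih hrest, h2]

-- A's fold over a block of non-starters just extends the content of the last message
lemma fold_block (bl : List (Option String × String))
    (hbl : ∀ t ∈ bl, pvIsStarter t = false)
    (msgs : List (List (String × String))) (s c : String) :
    bl.foldl pvAccum (msgs ++ [[("speaker", s), ("content", c)]])
      = msgs ++ [[("speaker", s), ("content", pvJoinAcc c bl)]] := by
  induction bl generalizing c with
  | nil => simp [pvJoinAcc]
  | cons t rest ih =>
      have hrest : ∀ u ∈ rest, pvIsStarter u = false := fun u hu => hbl u (List.mem_cons_of_mem _ hu)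
      have ht := hbl t (List.mem_cons_self)
      cases t with
      | mk osp txt =>
          cases osp with
          | none =>
              simp only [List.foldl_cons]
              have hstep : pvAccum (msgs ++ [[("speaker", s), ("content", c)]]) (none, txt)
                  = msgs ++ [[("speaker", s), ("content", c ++ " " ++ txt)]] := by
                cases msgs with
                | nil => simp [pvAccum, pvAddContent, String.append_assoc]
                | cons m ms =>
                    simp only [pvAccum, List.dropLast_concat, List.getLast?_concat]
                    simp [pvAddContent, String.append_assoc]
              rw [hstep, ih hrest]
              simp [pvJoinAcc]
          | some sp =>
              have htxt : txt = "" := by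
                by_contra h
                simp [pvIsStarter, h] at ht
              subst htxt
              simp only [List.foldl_cons]
              have hstep : pvAccum (msgs ++ [[("speaker", s), ("content", c)]]) (some sp, "")
                  = msgs ++ [[("speaker", s), ("content", c)]] := by simp [pvAccum]
              rw [hstep, ih hrest]
              simp [pvJoinAcc]

lemma head_dropWhile {α : Type} (p : α → Bool) (l : List α) (a : α)
    (h : (l.dropWhile p).head? = some a) : p a = false := by
  induction l with
  | nil => simp [List.dropWhile] at h
  | cons x xs ih =>
      by_cases hx : p x = true
      · rw [List.dropWhile_cons, if_pos hx] at h
        exact ih h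
      · rw [List.dropWhile_cons, if_neg hx] at h
        simp at h
        subst h
        simpa using hx


lemma pvBuild_nil : pvBuild [] = [] := by simp [pvBuild]

lemma pvBuild_none (txt : String) (rest : List (Option String × String)) :
    pvBuild ((none, txt) :: rest) = pvBuild rest := by simp [pvBuild]

lemma pvBuild_empty (s : String) (rest : List (Option String × String)) :
    pvBuild ((some s, "") :: rest) = pvBuild rest := by simp [pvBuild]

lemma pvBuild_some (s c : String) (rest : List (Option String × String)) (hc : c ≠ "") :
    pvBuild ((some s, c) :: rest) =
      [("speaker", s), ("content", PySem.Str.join " "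
          (c :: (rest.takeWhile (fun t => !pvIsStarter t)).filterMap
            (fun t => if t.1.isNone then some t.2 else none)))] ::
        pvBuild (rest.dropWhile (fun t => !pvIsStarter t)) := by
  rw [pvBuild]
  simp [hc]

-- from a starter-headed (or empty) tagged list, A's fold appends exactly B's blocks
lemma fold_eq_build_starter : ∀ (n : Nat) (ts : List (Option String × String)),
    ts.length ≤ n →
    (∀ t, ts.head? = some t → pvIsStarter t = true) →
    ∀ msgs, ts.foldl pvAccum msgs = msgs ++ pvBuild ts := by
  intro n
  induction n with
  | zero =>
      intro ts hlen _ msgs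
      have : ts = [] := List.length_eq_zero_iff.mp (Nat.le_zero.mp hlen)
      subst this; simp [pvBuild_nil]
  | succ n ih =>
      intro ts hlen hhead msgs
      cases ts with
      | nil => simp [pvBuild_nil]
      | cons t rest =>
          have ht : pvIsStarter t = true := hhead t rfl
          cases t with
          | mk osp c =>
              cases osp with
              | none => simp [pvIsStarter] at ht
              | some s =>
                  have hc : c ≠ "" := by
                    intro h; subst h; simp [pvIsStarter] at ht
                  have hstep : pvAccum msgs (some s, c)
                      = msgs ++ [[("speaker", s), ("content", c)]] := by
                    simp [pvAccum, hc]
                  have hsplit := List.takeWhile_append_dropWhile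
                    (p := fun t => !pvIsStarter t) (l := rest)
                  have hf : rest.foldl pvAccum (msgs ++ [[("speaker", s), ("content", c)]])
                      = (rest.dropWhile (fun t => !pvIsStarter t)).foldl pvAccum
                        ((rest.takeWhile (fun t => !pvIsStarter t)).foldl pvAccum
                          (msgs ++ [[("speaker", s), ("content", c)]])) := by
                    conv_lhs => rw [← hsplit]
                    rw [List.foldl_append]
                  have hblock : ∀ u ∈ rest.takeWhile (fun t => !pvIsStarter t),
                      pvIsStarter u = false := by
                    intro u hu
                    have := List.mem_takeWhile_imp hu
                    simpa using this
                  have hdrophead : ∀ u, (rest.dropWhile (fun t => !pvIsStarter t)).head? = some u →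
                      pvIsStarter u = true := by
                    intro u hu
                    have := head_dropWhile (fun t => !pvIsStarter t) rest u hu
                    simpa using this
                  have hdlen : (rest.dropWhile (fun t => !pvIsStarter t)).length ≤ n := by
                    have h1 := List.length_dropWhile_le (fun t => !pvIsStarter t) rest
                    have h2 : rest.length ≤ n := by simpa using Nat.succ_le_succ_iff.mp hlen
                    omega
                  rw [List.foldl_cons, hstep, hf,
                    fold_block _ hblock msgs s c,
                    ih _ hdlen hdrophead]
                  rw [pvBuild_some s c rest hc, joinAcc_eq_join _ hblock]
                  simp

-- the whole fold equals B's block scan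
lemma fold_eq_build (ts : List (Option String × String)) :
    ts.foldl pvAccum [] = pvBuild ts := by
  induction ts with
  | nil => simp [pvBuild_nil]
  | cons t rest ih =>
      by_cases ht : pvIsStarter t = true
      · simpa using fold_eq_build_starter (t :: rest).length (t :: rest) le_rfl
          (by intro u hu; simp at hu; subst hu; exact ht) []
      · cases t with
        | mk osp c =>
            cases osp with
            | none =>
                simp only [List.foldl_cons]
                have : pvAccum [] (none, c) = [] := by simp [pvAccum]
                rw [this, ih, pvBuild_none]
            | some s =>
                have hc : c = "" := by
                  by_contra h
                  simp [pvIsStarter, h] at ht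
                subst hc
                simp only [List.foldl_cons]
                have : pvAccum [] (some s, "") = [] := by simp [pvAccum]
                rw [this, ih, pvBuild_empty]

-- ===== VERDICT (by name: the statement is the Claim_ definition above) =====
theorem parse_dialog_py_spec : Claim_equal_parse_dialog_py := by
  intro raw speakers _
  unfold Spec_parse_dialog_py parse_dialog_py parse_dialog_py_alt
  rw [fold_eq_accum, fold_eq_build]
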